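-- pv_equiv track=rewrite | github.com/RithigaS/AI-Bug-Tracker | app.py | highlight_redacted
-- ===== SOURCE A (Python) =====
-- def highlight_redacted(text: str) -> str:
--     """Highlights redacted tags with HTML/CSS."""
--     tags = {
--         "[REDACTED_IP]": "#ff6b6b",
--         "[REDACTED_EMAIL]": "#f0ad4e",
--         "[REDACTED_SECRET]": "#ff4757",
--         "[REDACTED_PATH]": "#4ae3b5"
--     }
--
--     for tag, color in tags.items():
--         # Replace tag with a styled span
--         text = text.replace(tag, f'<span style="background-color: {color}33; color: {color}; padding: 3px 8px; border-radius: 4px; border: 1px solid {color}; font-weight: bold; display: inline-block; margin: 2px;">{tag}</span>')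
--
--     # Preserve newlines for markdown
--     text = text.replace("\n", "<br>")
--     return f'<div class="log-content-box">{text}</div>'
-- ===== SOURCE B (Python) =====
-- def highlight_redacted(text: str) -> str:
--     """Highlights redacted tags with HTML/CSS — single left-to-right scan with a dispatch table."""
--     def span(tag, color):
--         style = "; ".join([
--             f"background-color: {color}33",
--             f"color: {color}",
--             "padding: 3px 8px",
--             "border-radius: 4px",
--             f"border: 1px solid {color}",
--             "font-weight: bold",
--             "display: inline-block",
--             "margin: 2px",
--         ])
--         return f'<span style="{style};">{tag}</span>'
--     repl = {
--         "[REDACTED_IP]": span("[REDACTED_IP]", "#ff6b6b"),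
--         "[REDACTED_EMAIL]": span("[REDACTED_EMAIL]", "#f0ad4e"),
--         "[REDACTED_SECRET]": span("[REDACTED_SECRET]", "#ff4757"),
--         "[REDACTED_PATH]": span("[REDACTED_PATH]", "#4ae3b5"),
--         "\n": "<br>",
--     }
--     pieces = []
--     i = 0
--     n = len(text)
--     while i < n:
--         for pat, sub in repl.items():
--             if text.startswith(pat, i):
--                 pieces.append(sub)
--                 i += len(pat)
--                 break
--         else:
--             pieces.append(text[i])
--             i += 1
--     return '<div class="log-content-box">' + "".join(pieces) + "</div>"
-- ===== Notes on version B (the rewrite author's own statement) =====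
-- stated objective: alternative
-- what changed: A makes five sequential full-text replace passes (one str.replace per tag, then one for newlines); B builds a tag->replacement dispatch table once and does a single left-to-right scan over the text, emitting the styled span / <br> for the first table entry matching at the cursor and copying the character otherwise.
import Mathlib
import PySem

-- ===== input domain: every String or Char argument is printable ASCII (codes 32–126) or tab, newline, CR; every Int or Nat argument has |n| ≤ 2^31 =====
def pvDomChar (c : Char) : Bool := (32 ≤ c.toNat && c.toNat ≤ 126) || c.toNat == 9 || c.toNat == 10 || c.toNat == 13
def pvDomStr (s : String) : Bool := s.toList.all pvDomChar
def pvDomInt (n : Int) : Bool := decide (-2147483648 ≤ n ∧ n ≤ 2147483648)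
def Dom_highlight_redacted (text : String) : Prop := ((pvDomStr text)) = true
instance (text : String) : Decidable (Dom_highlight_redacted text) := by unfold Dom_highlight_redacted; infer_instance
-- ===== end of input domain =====

-- B replaces A's five sequential full-text replace passes by ONE left-to-right scan
-- with a dispatch table (first matching tag / newline at the cursor); same output.

-- ===== PORT A =====
-- the span f-string template (both Pythons build this same f-string)
def pvSpan (tag color : List Char) : List Char :=
  "<span style=\"background-color: ".toList ++ color ++ "33; color: ".toList ++ color
    ++ "; padding: 3px 8px; border-radius: 4px; border: 1px solid ".toList ++ color
    ++ "; font-weight: bold; display: inline-block; margin: 2px;\">".toList ++ tag ++ "</span>".toList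

-- A's tags dict (insertion order)
def pvTags : List (List Char × List Char) :=
  [("[REDACTED_IP]".toList, "#ff6b6b".toList), ("[REDACTED_EMAIL]".toList, "#f0ad4e".toList), ("[REDACTED_SECRET]".toList, "#ff4757".toList), ("[REDACTED_PATH]".toList, "#4ae3b5".toList)]

def highlight_redacted (text : String) : String :=
  -- for tag, color in tags.items(): text = text.replace(tag, span)
  let body := pvTags.foldl (fun t p => PySem.Chars.replace t p.1 (pvSpan p.1 p.2)) text.toList
  -- text = text.replace("\n", "<br>")
  let body2 := PySem.Chars.replace body "\n".toList "<br>".toList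
  String.mk ("<div class=\"log-content-box\">".toList ++ body2 ++ "</div>".toList)

-- ===== PORT B =====
-- Source B's span helper: the style attribute is "; ".join of its parts
def pvSpanB (tag color : List Char) : List Char :=
  "<span style=\"".toList
    ++ PySem.Chars.join "; ".toList
        ["background-color: ".toList ++ color ++ "33".toList,
         "color: ".toList ++ color,
         "padding: 3px 8px".toList,
         "border-radius: 4px".toList,
         "border: 1px solid ".toList ++ color,
         "font-weight: bold".toList,
         "display: inline-block".toList,
         "margin: 2px".toList]
    ++ ";\">".toList ++ tag ++ "</span>".toList

-- Source B's dispatch table repl (insertion order)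
def pvRepl : List (List Char × List Char) :=
  [("[REDACTED_IP]".toList, pvSpanB "[REDACTED_IP]".toList "#ff6b6b".toList),
   ("[REDACTED_EMAIL]".toList, pvSpanB "[REDACTED_EMAIL]".toList "#f0ad4e".toList),
   ("[REDACTED_SECRET]".toList, pvSpanB "[REDACTED_SECRET]".toList "#ff4757".toList),
   ("[REDACTED_PATH]".toList, pvSpanB "[REDACTED_PATH]".toList "#4ae3b5".toList),
   ("\n".toList, "<br>".toList)]

-- Source B's while loop: at the cursor, the first table entry whose pattern starts here
-- is emitted and skipped; otherwise the character is copied.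
def pvScan (ps : List (List Char × List Char)) : List Char → List Char
  | [] => []
  | c :: t =>
    match ps.find? (fun p => p.1.isPrefixOf (c :: t)) with
    | some p => p.2 ++ pvScan ps (t.drop (p.1.length - 1))
    | none => c :: pvScan ps t
termination_by s => s.length
decreasing_by
  · simpa using Nat.lt_succ_of_le (List.length_drop ▸ Nat.sub_le _ _)
  · simp

def highlight_redacted_alt (text : String) : String :=
  String.mk ("<div class=\"log-content-box\">".toList ++ pvScan pvRepl text.toList ++ "</div>".toList)

-- ===== PRECONDITION & SPEC =====
def Spec_highlight_redacted (text : String) (out : String) : Prop := out = highlight_redacted_alt text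
instance (text : String) (out : String) : Decidable (Spec_highlight_redacted text out) := by unfold Spec_highlight_redacted; infer_instance

-- ===== CLAIM (what is proved, stated in full; the proofs are below) =====
def Claim_equal_highlight_redacted : Prop := ∀ (text : String), Dom_highlight_redacted text → Spec_highlight_redacted text (highlight_redacted text)

-- ===== LEMMAS AND PROOFS =====

-- str.replace as the obvious structural recursion (proof-side characterisation of PySem.Chars.replace)
def pvRep (o n : List Char) : List Char → List Char
  | [] => []
  | c :: t => if o.isPrefixOf (c :: t) then n ++ pvRep o n (t.drop (o.length - 1)) else c :: pvRep o n t
termination_by l => l.length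
decreasing_by
  · simpa using Nat.lt_succ_of_le (List.length_drop ▸ Nat.sub_le _ _)
  · simp

theorem pvRep_go (o n : List Char) (ho : o ≠ []) :
    ∀ (fuel : Nat) (l acc : List Char), l.length ≤ fuel →
      PySem.Chars.replace.go o n fuel l acc = acc.reverse ++ pvRep o n l := by
  intro fuel
  induction fuel with
  | zero =>
    intro l acc h
    have hl : l = [] := List.eq_nil_of_length_eq_zero (Nat.le_zero.mp h)
    subst hl
    simp [PySem.Chars.replace.go, pvRep]
  | succ fuel ih =>
    intro l acc h
    cases l with
    | nil => simp [PySem.Chars.replace.go, pvRep]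
    | cons c t =>
      obtain ⟨oc, otl, rfl⟩ := List.exists_cons_of_ne_nil ho
      rw [PySem.Chars.replace.go, pvRep]
      by_cases hp : (oc :: otl).isPrefixOf (c :: t) = true
      · have hdrop : List.drop (oc :: otl).length (c :: t) = t.drop ((oc :: otl).length - 1) := by
          simp [List.drop]
        rw [if_pos hp, if_pos hp, hdrop, ih _ _ (by simp at h ⊢; omega)]
        simp
      · rw [if_neg hp, if_neg hp, ih t (c :: acc) (Nat.le_of_succ_le_succ h)]
        simp

theorem pvRep_eq_replace (o n : List Char) (ho : o ≠ []) (s : List Char) :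
    PySem.Chars.replace s o n = pvRep o n s := by
  rw [PySem.Chars.replace, if_neg (by simp [List.isEmpty_iff, ho])]
  simpa using pvRep_go o n ho s.length s [] (le_refl _)

-- "o cannot fire inside r, nor overhanging r's end" (Prop form used by the induction,
-- and a Bool scan of the same fact that `decide` evaluates cheaply)
def pvNoFire (o r : List Char) : Prop :=
  ∀ i < r.length, ¬ o.isPrefixOf (r.drop i) = true ∧ ¬ (r.drop i).isPrefixOf o = true

def pvNoFireB (o : List Char) : List Char → Bool
  | [] => true
  | c :: t => !(o.isPrefixOf (c :: t)) && !((c :: t).isPrefixOf o) && pvNoFireB o t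

theorem pvNoFireB_spec (o : List Char) : ∀ r, pvNoFireB o r = true → pvNoFire o r := by
  intro r
  induction r with
  | nil => intro _ i hi; simp at hi
  | cons c t ih =>
    intro h i hi
    rw [pvNoFireB] at h
    simp only [Bool.and_eq_true, Bool.not_eq_true'] at h
    cases i with
    | zero => simp [h.1.1, h.1.2]
    | succ j =>
      have := ih h.2 j (by simp at hi; omega)
      simpa using this

-- pvRep passes over a block where o cannot fire
theorem pvRep_append (o n r rest : List Char) (ho : o ≠ []) (h : pvNoFire o r) :
    pvRep o n (r ++ rest) = r ++ pvRep o n rest := by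
  induction r generalizing rest with
  | nil => simp
  | cons c r' ih =>
    have h0 := h 0 (by simp)
    simp only [List.drop_zero] at h0
    rw [List.cons_append, pvRep]
    have hnf : ¬ o.isPrefixOf (c :: (r' ++ rest)) = true := by
      intro hp
      rcases List.prefix_or_prefix_of_prefix (List.isPrefixOf_iff_prefix.mp hp)
          (List.prefix_append (c :: r') rest) with h1 | h2
      · exact h0.1 (List.isPrefixOf_iff_prefix.mpr h1)
      · exact h0.2 (List.isPrefixOf_iff_prefix.mpr h2)
    rw [if_neg hnf]
    congr 1
    have hshift : pvNoFire o r' := fun i hi => by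
      have := h (i + 1) (by simp only [List.length_cons]; omega)
      simpa only [List.drop_succ_cons] using this
    exact ih rest hshift

theorem pvScan_nil_ps (t : List Char) : pvScan [] t = t := by
  induction t with
  | nil => rw [pvScan]
  | cons c t ih => rw [pvScan]; simpa [List.find?] using ih

-- a prefix of the scan output made of chars no replacement starts with was copied from the input
theorem pvScan_prefix_pull (ps : List (List Char × List Char))
    (h2 : ∀ p ∈ ps, p.2 ≠ []) :
    ∀ (t x : List Char), (∀ p ∈ ps, ∀ c ∈ x, p.2.head? ≠ some c) →
      x.isPrefixOf (pvScan ps t) = true → x.isPrefixOf t = true := by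
  have key : ∀ (len : Nat) (t x : List Char), t.length ≤ len →
      (∀ p ∈ ps, ∀ c ∈ x, p.2.head? ≠ some c) →
      x.isPrefixOf (pvScan ps t) = true → x.isPrefixOf t = true := by
    intro len
    induction len with
    | zero =>
      intro t x hlen hx hp
      have ht : t = [] := List.eq_nil_of_length_eq_zero (Nat.le_zero.mp hlen)
      subst ht
      rw [pvScan] at hp
      exact hp
    | succ len ih =>
      intro t x hlen hx hp
      cases t with
      | nil => rw [pvScan] at hp; exact hp
      | cons c t' =>
        rw [pvScan] at hp
        cases hfind : ps.find? (fun p => p.1.isPrefixOf (c :: t')) with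
        | some p =>
          simp only [hfind] at hp
          cases x with
          | nil => rfl
          | cons d x' =>
            exfalso
            have hpmem := List.mem_of_find?_eq_some hfind
            obtain ⟨e, p2', hep⟩ := List.exists_cons_of_ne_nil (h2 p hpmem)
            rw [hep] at hp
            simp only [List.cons_append, List.isPrefixOf, Bool.and_eq_true, beq_iff_eq] at hp
            exact hx p hpmem d List.mem_cons_self (by rw [hep, List.head?_cons, hp.1])
        | none =>
          simp only [hfind] at hp
          cases x with
          | nil => rfl
          | cons d x' =>
            simp only [List.isPrefixOf, Bool.and_eq_true, beq_iff_eq] at hp ⊢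
            refine ⟨hp.1, ih t' x' (by simp only [List.length_cons] at hlen; omega) ?_ hp.2⟩
            intro p hpm c0 hc0
            exact hx p hpm c0 (List.mem_cons_of_mem d hc0)
  exact fun t x hx hp => key t.length t x le_rfl hx hp

-- the scan copies a region whose chars start no pattern
theorem pvScan_copy (ps : List (List Char × List Char)) (h1 : ∀ p ∈ ps, p.1 ≠ []) :
    ∀ (x t : List Char), x.isPrefixOf t = true → (∀ p ∈ ps, ∀ c ∈ x, p.1.head? ≠ some c) →
      pvScan ps t = x ++ pvScan ps (t.drop x.length) := by
  intro x
  induction x with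
  | nil => simp
  | cons c x' ih =>
    intro t hx h
    cases t with
    | nil => simp [List.isPrefixOf] at hx
    | cons d t' =>
      simp only [List.isPrefixOf, Bool.and_eq_true, beq_iff_eq] at hx
      rw [pvScan]
      have hfind : ps.find? (fun p => p.1.isPrefixOf (d :: t')) = none := by
        apply List.find?_eq_none.mpr
        intro p hp hpre
        obtain ⟨ph, pt, hpe⟩ := List.exists_cons_of_ne_nil (h1 p hp)
        rw [hpe] at hpre
        simp only [List.isPrefixOf, Bool.and_eq_true, beq_iff_eq] at hpre
        exact h p hp d (by rw [hx.1]; exact List.mem_cons_self) (by rw [hpe, List.head?_cons, hpre.1])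
      simp only [hfind]
      rw [ih t' hx.2 (fun p hp cc hcc => h p hp cc (List.mem_cons_of_mem c hcc))]
      simp [hx.1]

-- fusing one more replace pass into the scan
theorem pvStep (ps : List (List Char × List Char)) (o n : List Char)
    (h1 : ∀ p ∈ ps, p.1 ≠ []) (ho : o ≠ [])
    (hpass : ∀ p ∈ ps, pvNoFireB o p.2 = true)
    (h2 : ∀ p ∈ ps, p.2 ≠ [])
    (hnew : ∀ p ∈ ps, ∀ c ∈ o.tail, p.2.head? ≠ some c)
    (hcopy : ps.all (fun p => o.tail.all (fun c => p.1.head? != some c)) = true) :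
    ∀ t, pvRep o n (pvScan ps t) = pvScan (ps ++ [(o, n)]) t := by
  have hcopy' : ∀ p ∈ ps, ∀ c ∈ o.tail, p.1.head? ≠ some c := by
    intro p hp c hc
    have h := List.all_eq_true.mp (List.all_eq_true.mp hcopy p hp) c hc
    simpa using h
  have key : ∀ (len : Nat) (t : List Char), t.length ≤ len →
      pvRep o n (pvScan ps t) = pvScan (ps ++ [(o, n)]) t := by
    intro len
    induction len with
    | zero =>
      intro t hlen
      have ht : t = [] := List.eq_nil_of_length_eq_zero (Nat.le_zero.mp hlen)
      subst ht
      rw [pvScan, pvScan, pvRep]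
    | succ len ih =>
      intro t hlen
      cases t with
      | nil => rw [pvScan, pvScan, pvRep]
      | cons c t' =>
        rw [pvScan, pvScan]
        cases hfind : ps.find? (fun p => p.1.isPrefixOf (c :: t')) with
        | some p =>
          have hmem := List.mem_of_find?_eq_some hfind
          have hfind' : (ps ++ [(o, n)]).find? (fun p => p.1.isPrefixOf (c :: t')) = some p := by
            rw [List.find?_append, hfind]; rfl
          simp only [hfind, hfind']
          rw [pvRep_append o n p.2 _ ho (pvNoFireB_spec o p.2 (hpass p hmem))]
          congr 1
          exact ih _ (by simp only [List.length_cons] at hlen; simp only [List.length_drop]; omega)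
        | none =>
          obtain ⟨oc, otl, rfl⟩ := List.exists_cons_of_ne_nil ho
          by_cases hp : (oc :: otl).isPrefixOf (c :: t') = true
          · simp only [List.isPrefixOf, Bool.and_eq_true, beq_iff_eq] at hp
            have hcopyE : pvScan ps t' = otl ++ pvScan ps (t'.drop otl.length) :=
              pvScan_copy ps h1 otl t' hp.2 (fun q hq cc hcc => hcopy' q hq cc hcc)
            have hfind' : (ps ++ [(oc :: otl, n)]).find? (fun p => p.1.isPrefixOf (c :: t')) = some (oc :: otl, n) := by
              rw [List.find?_append, hfind]
              simp [List.find?, List.isPrefixOf, hp.1, hp.2]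
            simp only [hfind, hfind']
            rw [pvRep]
            have hfire : (oc :: otl).isPrefixOf (c :: pvScan ps t') = true := by
              rw [hcopyE]
              apply List.isPrefixOf_iff_prefix.mpr
              rw [hp.1]
              exact List.cons_prefix_cons.mpr ⟨rfl, List.prefix_append otl _⟩
            rw [if_pos hfire, hcopyE]
            have hdrop : ((otl ++ pvScan ps (t'.drop otl.length)).drop ((oc :: otl).length - 1)) = pvScan ps (t'.drop otl.length) := by
              simp
            rw [hdrop]
            congr 1
            have := ih (t'.drop otl.length) (by simp only [List.length_cons] at hlen; simp only [List.length_drop]; omega)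
            simpa using this
          · have hnof : ¬ (oc :: otl).isPrefixOf (c :: pvScan ps t') = true := by
              intro hfi
              simp only [List.isPrefixOf, Bool.and_eq_true, beq_iff_eq] at hfi
              have hpull := pvScan_prefix_pull ps h2 t' otl (fun q hq c0 hc0 => hnew q hq c0 hc0) hfi.2
              exact hp (by simp [List.isPrefixOf, hfi.1, hpull])
            have hfind' : (ps ++ [(oc :: otl, n)]).find? (fun p => p.1.isPrefixOf (c :: t')) = none := by
              rw [List.find?_append, hfind]
              simp only [Option.none_or]
              simp [List.find?, hp]
            simp only [hfind, hfind']
            rw [pvRep, if_neg hnof]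
            congr 1
            exact ih t' (by simp only [List.length_cons] at hlen; omega)
  exact fun t => key t.length t le_rfl

set_option maxRecDepth 8000 in
theorem pvNF_2_1 : pvNoFireB "[REDACTED_EMAIL]".toList (pvSpan "[REDACTED_IP]".toList "#ff6b6b".toList) = true := by decide

set_option maxRecDepth 8000 in
theorem pvNF_3_1 : pvNoFireB "[REDACTED_SECRET]".toList (pvSpan "[REDACTED_IP]".toList "#ff6b6b".toList) = true := by decide

set_option maxRecDepth 8000 in
theorem pvNF_3_2 : pvNoFireB "[REDACTED_SECRET]".toList (pvSpan "[REDACTED_EMAIL]".toList "#f0ad4e".toList) = true := by decide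

set_option maxRecDepth 8000 in
theorem pvNF_4_1 : pvNoFireB "[REDACTED_PATH]".toList (pvSpan "[REDACTED_IP]".toList "#ff6b6b".toList) = true := by decide

set_option maxRecDepth 8000 in
theorem pvNF_4_2 : pvNoFireB "[REDACTED_PATH]".toList (pvSpan "[REDACTED_EMAIL]".toList "#f0ad4e".toList) = true := by decide

set_option maxRecDepth 8000 in
theorem pvNF_4_3 : pvNoFireB "[REDACTED_PATH]".toList (pvSpan "[REDACTED_SECRET]".toList "#ff4757".toList) = true := by decide

set_option maxRecDepth 8000 in
theorem pvNF_5_1 : pvNoFireB "\n".toList (pvSpan "[REDACTED_IP]".toList "#ff6b6b".toList) = true := by decide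

set_option maxRecDepth 8000 in
theorem pvNF_5_2 : pvNoFireB "\n".toList (pvSpan "[REDACTED_EMAIL]".toList "#f0ad4e".toList) = true := by decide

set_option maxRecDepth 8000 in
theorem pvNF_5_3 : pvNoFireB "\n".toList (pvSpan "[REDACTED_SECRET]".toList "#ff4757".toList) = true := by decide

set_option maxRecDepth 8000 in
theorem pvNF_5_4 : pvNoFireB "\n".toList (pvSpan "[REDACTED_PATH]".toList "#4ae3b5".toList) = true := by decide

-- structural facts about the span template (avoid deep kernel evaluation)
theorem pvSpan_ne_nil (tag color : List Char) : pvSpan tag color ≠ [] := by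
  simp [pvSpan]

theorem pvSpan_head (tag color : List Char) : (pvSpan tag color).head? = some '<' := by
  rw [pvSpan]
  rfl

-- Source B's joined style attribute spells out A's span f-string (checked per tag)
set_option maxRecDepth 8000 in
theorem pvSpanB_eq1 : pvSpanB "[REDACTED_IP]".toList "#ff6b6b".toList = pvSpan "[REDACTED_IP]".toList "#ff6b6b".toList := by decide

set_option maxRecDepth 8000 in
theorem pvSpanB_eq2 : pvSpanB "[REDACTED_EMAIL]".toList "#f0ad4e".toList = pvSpan "[REDACTED_EMAIL]".toList "#f0ad4e".toList := by decide

set_option maxRecDepth 8000 in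
theorem pvSpanB_eq3 : pvSpanB "[REDACTED_SECRET]".toList "#ff4757".toList = pvSpan "[REDACTED_SECRET]".toList "#ff4757".toList := by decide

set_option maxRecDepth 8000 in
theorem pvSpanB_eq4 : pvSpanB "[REDACTED_PATH]".toList "#4ae3b5".toList = pvSpan "[REDACTED_PATH]".toList "#4ae3b5".toList := by decide


-- the five replace passes of A fuse, one at a time, into B's single scan

set_option maxRecDepth 8000 in
theorem pvChain (l : List Char) :
    pvRep "\n".toList "<br>".toList (pvRep "[REDACTED_PATH]".toList (pvSpan "[REDACTED_PATH]".toList "#4ae3b5".toList) (pvRep "[REDACTED_SECRET]".toList (pvSpan "[REDACTED_SECRET]".toList "#ff4757".toList) (pvRep "[REDACTED_EMAIL]".toList (pvSpan "[REDACTED_EMAIL]".toList "#f0ad4e".toList) (pvRep "[REDACTED_IP]".toList (pvSpan "[REDACTED_IP]".toList "#ff6b6b".toList) l)))) = pvScan pvRepl l := by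
  have e1 : pvRep "[REDACTED_IP]".toList (pvSpan "[REDACTED_IP]".toList "#ff6b6b".toList) l = pvScan [("[REDACTED_IP]".toList, pvSpan "[REDACTED_IP]".toList "#ff6b6b".toList)] l := by
    have := pvStep [] "[REDACTED_IP]".toList (pvSpan "[REDACTED_IP]".toList "#ff6b6b".toList) (by decide) (by decide) (by intro p hp; exact absurd hp (List.not_mem_nil)) (by intro p hp; exact absurd hp (List.not_mem_nil)) (by decide) (by decide) l
    rwa [pvScan_nil_ps] at this
  have e2 : pvRep "[REDACTED_EMAIL]".toList (pvSpan "[REDACTED_EMAIL]".toList "#f0ad4e".toList) (pvScan [("[REDACTED_IP]".toList, pvSpan "[REDACTED_IP]".toList "#ff6b6b".toList)] l) = pvScan [("[REDACTED_IP]".toList, pvSpan "[REDACTED_IP]".toList "#ff6b6b".toList), ("[REDACTED_EMAIL]".toList, pvSpan "[REDACTED_EMAIL]".toList "#f0ad4e".toList)] l := by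
    exact pvStep [("[REDACTED_IP]".toList, pvSpan "[REDACTED_IP]".toList "#ff6b6b".toList)] "[REDACTED_EMAIL]".toList (pvSpan "[REDACTED_EMAIL]".toList "#f0ad4e".toList) (by decide) (by decide) (by refine List.forall_mem_cons.mpr ⟨pvNF_2_1, ?_⟩; exact List.forall_mem_nil _) (by intro p hp; simp only [List.mem_cons, List.mem_singleton, List.not_mem_nil, or_false] at hp; rcases hp with rfl <;> exact pvSpan_ne_nil _ _) (by intro p hp c hc hq; simp only [List.mem_cons, List.mem_singleton, List.not_mem_nil, or_false] at hp; rcases hp with rfl <;> (rw [pvSpan_head] at hq; injection hq with h; subst h; revert hc; decide)) (by decide) l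
  have e3 : pvRep "[REDACTED_SECRET]".toList (pvSpan "[REDACTED_SECRET]".toList "#ff4757".toList) (pvScan [("[REDACTED_IP]".toList, pvSpan "[REDACTED_IP]".toList "#ff6b6b".toList), ("[REDACTED_EMAIL]".toList, pvSpan "[REDACTED_EMAIL]".toList "#f0ad4e".toList)] l) = pvScan [("[REDACTED_IP]".toList, pvSpan "[REDACTED_IP]".toList "#ff6b6b".toList), ("[REDACTED_EMAIL]".toList, pvSpan "[REDACTED_EMAIL]".toList "#f0ad4e".toList), ("[REDACTED_SECRET]".toList, pvSpan "[REDACTED_SECRET]".toList "#ff4757".toList)] l := by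
    exact pvStep [("[REDACTED_IP]".toList, pvSpan "[REDACTED_IP]".toList "#ff6b6b".toList), ("[REDACTED_EMAIL]".toList, pvSpan "[REDACTED_EMAIL]".toList "#f0ad4e".toList)] "[REDACTED_SECRET]".toList (pvSpan "[REDACTED_SECRET]".toList "#ff4757".toList) (by decide) (by decide) (by refine List.forall_mem_cons.mpr ⟨pvNF_3_1, ?_⟩; refine List.forall_mem_cons.mpr ⟨pvNF_3_2, ?_⟩; exact List.forall_mem_nil _) (by intro p hp; simp only [List.mem_cons, List.mem_singleton, List.not_mem_nil, or_false] at hp; rcases hp with rfl | rfl <;> exact pvSpan_ne_nil _ _) (by intro p hp c hc hq; simp only [List.mem_cons, List.mem_singleton, List.not_mem_nil, or_false] at hp; rcases hp with rfl | rfl <;> (rw [pvSpan_head] at hq; injection hq with h; subst h; revert hc; decide)) (by decide) l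
  have e4 : pvRep "[REDACTED_PATH]".toList (pvSpan "[REDACTED_PATH]".toList "#4ae3b5".toList) (pvScan [("[REDACTED_IP]".toList, pvSpan "[REDACTED_IP]".toList "#ff6b6b".toList), ("[REDACTED_EMAIL]".toList, pvSpan "[REDACTED_EMAIL]".toList "#f0ad4e".toList), ("[REDACTED_SECRET]".toList, pvSpan "[REDACTED_SECRET]".toList "#ff4757".toList)] l) = pvScan [("[REDACTED_IP]".toList, pvSpan "[REDACTED_IP]".toList "#ff6b6b".toList), ("[REDACTED_EMAIL]".toList, pvSpan "[REDACTED_EMAIL]".toList "#f0ad4e".toList), ("[REDACTED_SECRET]".toList, pvSpan "[REDACTED_SECRET]".toList "#ff4757".toList), ("[REDACTED_PATH]".toList, pvSpan "[REDACTED_PATH]".toList "#4ae3b5".toList)] l := by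
    exact pvStep [("[REDACTED_IP]".toList, pvSpan "[REDACTED_IP]".toList "#ff6b6b".toList), ("[REDACTED_EMAIL]".toList, pvSpan "[REDACTED_EMAIL]".toList "#f0ad4e".toList), ("[REDACTED_SECRET]".toList, pvSpan "[REDACTED_SECRET]".toList "#ff4757".toList)] "[REDACTED_PATH]".toList (pvSpan "[REDACTED_PATH]".toList "#4ae3b5".toList) (by decide) (by decide) (by refine List.forall_mem_cons.mpr ⟨pvNF_4_1, ?_⟩; refine List.forall_mem_cons.mpr ⟨pvNF_4_2, ?_⟩; refine List.forall_mem_cons.mpr ⟨pvNF_4_3, ?_⟩; exact List.forall_mem_nil _) (by intro p hp; simp only [List.mem_cons, List.mem_singleton, List.not_mem_nil, or_false] at hp; rcases hp with rfl | rfl | rfl <;> exact pvSpan_ne_nil _ _) (by intro p hp c hc hq; simp only [List.mem_cons, List.mem_singleton, List.not_mem_nil, or_false] at hp; rcases hp with rfl | rfl | rfl <;> (rw [pvSpan_head] at hq; injection hq with h; subst h; revert hc; decide)) (by decide) l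
  have e5 : pvRep "\n".toList ("<br>".toList) (pvScan [("[REDACTED_IP]".toList, pvSpan "[REDACTED_IP]".toList "#ff6b6b".toList), ("[REDACTED_EMAIL]".toList, pvSpan "[REDACTED_EMAIL]".toList "#f0ad4e".toList), ("[REDACTED_SECRET]".toList, pvSpan "[REDACTED_SECRET]".toList "#ff4757".toList), ("[REDACTED_PATH]".toList, pvSpan "[REDACTED_PATH]".toList "#4ae3b5".toList)] l) = pvScan ([("[REDACTED_IP]".toList, pvSpan "[REDACTED_IP]".toList "#ff6b6b".toList), ("[REDACTED_EMAIL]".toList, pvSpan "[REDACTED_EMAIL]".toList "#f0ad4e".toList), ("[REDACTED_SECRET]".toList, pvSpan "[REDACTED_SECRET]".toList "#ff4757".toList), ("[REDACTED_PATH]".toList, pvSpan "[REDACTED_PATH]".toList "#4ae3b5".toList)] ++ [("\n".toList, "<br>".toList)]) l := by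
    exact pvStep [("[REDACTED_IP]".toList, pvSpan "[REDACTED_IP]".toList "#ff6b6b".toList), ("[REDACTED_EMAIL]".toList, pvSpan "[REDACTED_EMAIL]".toList "#f0ad4e".toList), ("[REDACTED_SECRET]".toList, pvSpan "[REDACTED_SECRET]".toList "#ff4757".toList), ("[REDACTED_PATH]".toList, pvSpan "[REDACTED_PATH]".toList "#4ae3b5".toList)] "\n".toList ("<br>".toList) (by decide) (by decide) (by refine List.forall_mem_cons.mpr ⟨pvNF_5_1, ?_⟩; refine List.forall_mem_cons.mpr ⟨pvNF_5_2, ?_⟩; refine List.forall_mem_cons.mpr ⟨pvNF_5_3, ?_⟩; refine List.forall_mem_cons.mpr ⟨pvNF_5_4, ?_⟩; exact List.forall_mem_nil _) (by intro p hp; simp only [List.mem_cons, List.mem_singleton, List.not_mem_nil, or_false] at hp; rcases hp with rfl | rfl | rfl | rfl <;> exact pvSpan_ne_nil _ _) (by intro p hp c hc hq; simp only [List.mem_cons, List.mem_singleton, List.not_mem_nil, or_false] at hp; rcases hp with rfl | rfl | rfl | rfl <;> (rw [pvSpan_head] at hq; injection hq with h; subst h; revert hc; decide)) (by decide) l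
  have hrepl : pvRepl = [("[REDACTED_IP]".toList, pvSpan "[REDACTED_IP]".toList "#ff6b6b".toList), ("[REDACTED_EMAIL]".toList, pvSpan "[REDACTED_EMAIL]".toList "#f0ad4e".toList), ("[REDACTED_SECRET]".toList, pvSpan "[REDACTED_SECRET]".toList "#ff4757".toList), ("[REDACTED_PATH]".toList, pvSpan "[REDACTED_PATH]".toList "#4ae3b5".toList)] ++ [("\n".toList, "<br>".toList)] := by
    unfold pvRepl
    rw [pvSpanB_eq1, pvSpanB_eq2, pvSpanB_eq3, pvSpanB_eq4]
    rfl
  rw [e1, e2, e3, e4, e5, hrepl]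

-- ===== VERDICT (by name: the statement is the Claim_ definition above) =====
theorem highlight_redacted_spec : Claim_equal_highlight_redacted := by
  intro text _
  unfold Spec_highlight_redacted highlight_redacted highlight_redacted_alt
  simp only [pvTags, List.foldl_cons, List.foldl_nil]
  rw [pvRep_eq_replace _ _ (by decide), pvRep_eq_replace _ _ (by decide),
    pvRep_eq_replace _ _ (by decide), pvRep_eq_replace _ _ (by decide),
    pvRep_eq_replace _ _ (by decide), pvChain]
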